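-- pv_equiv track=rewrite | github.com/Herman1010/SymfonyRAG | src/ingest.py | extract_section_titles_from_raw
-- ===== SOURCE A (Python) =====
-- def extract_section_titles_from_raw(text: str):
--     lines = text.split("\n")
--     titles = []
--     i = 0
--     while i < len(lines) - 1:
--         line = lines[i].strip()
--         deco = lines[i + 1].strip()
--
--         if line and deco and len(deco) >= 3 and set(deco) <= set("=~`-^\"'*+_#-"):
--             titles.append(line)
--             i += 2
--         else:
--             i += 1
--     return titles
-- ===== SOURCE B (Python) =====
-- def extract_section_titles_from_raw(text: str):
--     DECO = set("=~`-^\"'*+_#")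
--     titles = []
--     pending = None
--     for raw in text.split("\n"):
--         line = raw.strip()
--         if pending and len(line) >= 3 and set(line) <= DECO:
--             titles.append(pending)
--             pending = None
--         else:
--             pending = line
--     return titles
-- ===== Notes on version B (the rewrite author's own statement) =====
-- stated objective: simpler
-- what changed: Replaces A's index-based while loop with skip-by-2/skip-by-1 arithmetic by a single for-loop over the lines carrying a pending-candidate-title state (None after a consumed underline), with the redundant non-empty check on the decoration dropped.
import Mathlib
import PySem

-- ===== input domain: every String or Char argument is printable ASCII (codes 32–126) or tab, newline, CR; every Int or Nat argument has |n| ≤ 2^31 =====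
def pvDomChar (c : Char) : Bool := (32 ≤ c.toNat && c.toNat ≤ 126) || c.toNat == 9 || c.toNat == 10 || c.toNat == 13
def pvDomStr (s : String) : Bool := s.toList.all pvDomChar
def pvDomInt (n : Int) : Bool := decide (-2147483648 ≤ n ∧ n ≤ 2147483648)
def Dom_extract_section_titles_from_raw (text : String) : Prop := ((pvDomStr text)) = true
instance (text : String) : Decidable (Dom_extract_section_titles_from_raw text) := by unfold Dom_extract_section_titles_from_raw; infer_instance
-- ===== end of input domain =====

-- B replaces A's index-based while loop (skip-by-2 on match) with a single pass
-- carrying a pending-title state; objective: simpler/idiomatic, same O(n) cost.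


-- ===== PORT A =====
-- `line and deco and len(deco) >= 3 and set(deco) <= set("=~`-^\"'*+_#-")` —
-- the set inclusion is ported exactly as: every char of deco occurs in that literal
-- (subset of finite char sets = all-membership; the duplicate '-' is kept as written).
def pvCondA (line deco : String) : Bool :=
  !(line == "") && !(deco == "") && decide (3 ≤ deco.toList.length) &&
    deco.toList.all (fun c => c ∈ ['=','~','`','-','^','"','\'','*','+','_','#','-'])

-- the while loop: i → i+2 on a match (drop both lines), i → i+1 otherwise; stops at len-1
def pvLoopA : List String → List String
  | [] => []
  | [_] => []
  | a :: b :: rest =>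
    if pvCondA (PySem.Str.strip a) (PySem.Str.strip b)
    then PySem.Str.strip a :: pvLoopA rest
    else pvLoopA (b :: rest)

def extract_section_titles_from_raw (text : String) : List String :=
  pvLoopA ((PySem.Str.split? text "\n").getD [])  -- sep = "\n" ≠ "", so split? is never none

-- ===== PORT B =====
-- `pending and len(line) >= 3 and set(line) <= DECO` (DECO has no duplicate '-')
def pvCondB (pending line : String) : Bool :=
  !(pending == "") && decide (3 ≤ line.toList.length) &&
    line.toList.all (fun c => c ∈ ['=','~','`','-','^','"','\'','*','+','_','#'])

-- one for-loop over the lines, state = (titles so far, pending candidate title)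
def pvStepB (st : List String × Option String) (raw : String) : List String × Option String :=
  let line := PySem.Str.strip raw
  match st.2 with
  | some p => if pvCondB p line then (st.1 ++ [p], none) else (st.1, some line)
  | none => (st.1, some line)

def extract_section_titles_from_raw_alt (text : String) : List String :=
  (((PySem.Str.split? text "\n").getD []).foldl pvStepB ([], none)).1

-- ===== PRECONDITION & SPEC =====
def Spec_extract_section_titles_from_raw (text : String) (out : List String) : Prop := out = extract_section_titles_from_raw_alt text
instance (text : String) (out : List String) : Decidable (Spec_extract_section_titles_from_raw text out) := by unfold Spec_extract_section_titles_from_raw; infer_instance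

-- ===== CLAIM (what is proved, stated in full; the proofs are below) =====
def Claim_equal_extract_section_titles_from_raw : Prop := ∀ (text : String), Dom_extract_section_titles_from_raw text → Spec_extract_section_titles_from_raw text (extract_section_titles_from_raw text)

-- ===== LEMMAS AND PROOFS =====

-- A's loop seen from a pending stripped head s
def pvLoopAs (s : String) : List String → List String
  | [] => []
  | b :: rest =>
    if pvCondA s (PySem.Str.strip b)
    then s :: pvLoopA rest
    else pvLoopA (b :: rest)

theorem pvLoopA_cons (b : String) (rest : List String) :
    pvLoopA (b :: rest) = pvLoopAs (PySem.Str.strip b) rest := by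
  cases rest <;> rfl

-- the two guards are equal: `deco ≠ ""` is implied by `len(deco) ≥ 3`, and the two
-- character lists name the same set (A's has '-' twice)
theorem pvCond_eq (s d : String) : pvCondA s d = pvCondB s d := by
  rw [Bool.eq_iff_iff]
  simp only [pvCondA, pvCondB, Bool.and_eq_true, Bool.not_eq_true', beq_eq_false_iff_ne,
    ne_eq, decide_eq_true_eq, List.all_eq_true, List.mem_cons, List.not_mem_nil,
    decide_eq_true_eq]
  constructor
  · rintro ⟨⟨⟨h1, _⟩, h3⟩, h4⟩
    refine ⟨⟨h1, h3⟩, fun c hc => ?_⟩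
    have := h4 c hc; tauto
  · rintro ⟨⟨h1, h3⟩, h4⟩
    have hd : ¬ d = "" := by
      intro h; subst h; simp at h3
    refine ⟨⟨⟨h1, hd⟩, h3⟩, fun c hc => ?_⟩
    have := h4 c hc; tauto

-- unrolling B's fold: the accumulated titles prefix factors out
def pvRecB : List String → Option String → List String
  | [], _ => []
  | raw :: rest, p =>
    let line := PySem.Str.strip raw
    match p with
    | some q => if pvCondB q line then q :: pvRecB rest none else pvRecB rest (some line)
    | none => pvRecB rest (some line)

theorem pvFoldB_eq (ls : List String) : ∀ (acc : List String) (p : Option String),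
    (ls.foldl pvStepB (acc, p)).1 = acc ++ pvRecB ls p := by
  induction ls with
  | nil => intro acc p; simp [pvRecB]
  | cons raw rest ih =>
    intro acc p
    cases p with
    | none => simp [List.foldl_cons, pvStepB, pvRecB, ih]
    | some q =>
      by_cases h : pvCondB q (PySem.Str.strip raw)
      · simp [List.foldl_cons, pvStepB, pvRecB, h, ih]
      · simp [List.foldl_cons, pvStepB, pvRecB, h, ih]

theorem pvRecB_eq_loopA (ls : List String) :
    (∀ s, pvRecB ls (some s) = pvLoopAs s ls) ∧ pvRecB ls none = pvLoopA ls := by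
  induction ls with
  | nil => exact ⟨fun _ => rfl, rfl⟩
  | cons b rest ih =>
    constructor
    · intro s
      show (if pvCondB s (PySem.Str.strip b) then s :: pvRecB rest none
            else pvRecB rest (some (PySem.Str.strip b))) = pvLoopAs s (b :: rest)
      rw [show pvLoopAs s (b :: rest) =
            (if pvCondA s (PySem.Str.strip b) then s :: pvLoopA rest
             else pvLoopA (b :: rest)) from rfl, pvCond_eq]
      by_cases h : pvCondB s (PySem.Str.strip b)
      · rw [if_pos h, if_pos h, ih.2]
      · rw [if_neg h, if_neg h, ih.1, pvLoopA_cons]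
    · show pvRecB rest (some (PySem.Str.strip b)) = pvLoopA (b :: rest)
      rw [ih.1, pvLoopA_cons]

-- ===== VERDICT (by name: the statement is the Claim_ definition above) =====
theorem extract_section_titles_from_raw_spec : Claim_equal_extract_section_titles_from_raw := by
  intro text _
  show extract_section_titles_from_raw text = extract_section_titles_from_raw_alt text
  unfold extract_section_titles_from_raw extract_section_titles_from_raw_alt
  rw [pvFoldB_eq, (pvRecB_eq_loopA _).2, List.nil_append]
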